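-- pv_equiv track=rewrite | github.com/niklasr22/AoC | 2021/day19/day19.py | orientation
-- ===== SOURCE A (Python) =====
-- def orientation(scanner):
--     res = []
--     for r in range(6):
--         for o in [0, 90, 180, 270]:
--             rotated = []
--             for b in scanner:
--                 x, y, z = b
--                 if o == 180:
--                     x = -x
--                     y = -y
--                 elif o == 90:
--                     x, y = y, -x
--                 elif o == 270:
--                     x, y = -y, x
--
--                 xx = x
--                 yy = y
--                 zz = z
--                 if r == 0:
--                     xx = x
--                     yy = y
--                     zz = z
--                 elif r == 1:  # 90 deg around x
--                     xx = x
--                     yy = -z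
--                     zz = y
--                 elif r == 2:  # 180 deg around x
--                     xx = x
--                     yy = -y
--                     zz = -z
--                 elif r == 3:  # 270 deg around x
--                     xx = x
--                     yy = z
--                     zz = -y
--                 elif r == 4:  # 90 deg around y
--                     xx = z
--                     yy = y
--                     zz = -x
--                 elif r == 5:  # 270 deg around y
--                     xx = -z
--                     yy = y
--                     zz = x
--                 rotated.append((xx, yy, zz))
--             res.append(rotated)
--     return res
-- ===== SOURCE B (Python) =====
-- # Table-driven: precompute the 24 orientation matrices (R_r composed with O_o,
-- # r-major / o-minor, same order as A's loops) and apply each by matrix-vector product.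
--
-- _OS = (
--     ((1, 0, 0), (0, 1, 0), (0, 0, 1)),      # o = 0
--     ((0, 1, 0), (-1, 0, 0), (0, 0, 1)),     # o = 90:  x,y = y,-x
--     ((-1, 0, 0), (0, -1, 0), (0, 0, 1)),    # o = 180: x,y = -x,-y
--     ((0, -1, 0), (1, 0, 0), (0, 0, 1)),     # o = 270: x,y = -y,x
-- )
--
-- _RS = (
--     ((1, 0, 0), (0, 1, 0), (0, 0, 1)),      # r = 0
--     ((1, 0, 0), (0, 0, -1), (0, 1, 0)),     # r = 1: 90 deg around x
--     ((1, 0, 0), (0, -1, 0), (0, 0, -1)),    # r = 2: 180 deg around x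
--     ((1, 0, 0), (0, 0, 1), (0, -1, 0)),     # r = 3: 270 deg around x
--     ((0, 0, 1), (0, 1, 0), (-1, 0, 0)),     # r = 4: 90 deg around y
--     ((0, 0, -1), (0, 1, 0), (1, 0, 0)),     # r = 5: 270 deg around y
-- )
--
--
-- def _mul(a, b):
--     return tuple(
--         tuple(sum(a[i][k] * b[k][j] for k in range(3)) for j in range(3))
--         for i in range(3)
--     )
--
--
-- _MATS = [_mul(r, o) for r in _RS for o in _OS]
--
--
-- def orientation(scanner):
--     return [
--         [
--             (
--                 m[0][0] * x + m[0][1] * y + m[0][2] * z,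
--                 m[1][0] * x + m[1][1] * y + m[1][2] * z,
--                 m[2][0] * x + m[2][1] * y + m[2][2] * z,
--             )
--             for (x, y, z) in scanner
--         ]
--         for m in _MATS
--     ]
-- ===== Notes on version B (the rewrite author's own statement) =====
-- stated objective: idiomatic
-- what changed: Replaced the per-point nested if/elif branching by 24 precomputed integer 3x3 orientation matrices (R_r composed with O_o, in A's loop order) applied uniformly as matrix-vector products.
import Mathlib
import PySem

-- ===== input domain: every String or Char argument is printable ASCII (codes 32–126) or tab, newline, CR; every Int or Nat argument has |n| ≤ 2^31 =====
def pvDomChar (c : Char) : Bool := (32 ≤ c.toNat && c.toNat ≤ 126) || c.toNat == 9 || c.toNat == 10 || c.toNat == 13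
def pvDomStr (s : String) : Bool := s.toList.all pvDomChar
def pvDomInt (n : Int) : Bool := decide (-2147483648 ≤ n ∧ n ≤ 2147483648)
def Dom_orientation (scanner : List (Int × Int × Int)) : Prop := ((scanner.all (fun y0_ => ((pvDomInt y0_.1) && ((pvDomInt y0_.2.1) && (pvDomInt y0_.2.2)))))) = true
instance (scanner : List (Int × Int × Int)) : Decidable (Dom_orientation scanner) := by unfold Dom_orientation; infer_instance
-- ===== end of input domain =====

-- B replaces A's per-point branch chains by 24 precomputed integer rotation matrices
-- applied uniformly (idiomatic table-driven form); return values are identical.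

-- ===== PORT A =====
-- per-point body of A's innermost loop, branches in A's order
def rotA (r o : Int) (b : Int × Int × Int) : Int × Int × Int :=
  let x := b.1; let y := b.2.1; let z := b.2.2
  let (x, y) :=
    if o = 180 then (-x, -y)
    else if o = 90 then (y, -x)
    else if o = 270 then (-y, x)
    else (x, y)
  if r = 0 then (x, y, z)
  else if r = 1 then (x, -z, y)
  else if r = 2 then (x, -y, -z)
  else if r = 3 then (x, z, -y)
  else if r = 4 then (z, y, -x)
  else if r = 5 then (-z, y, x)
  else (x, y, z)

def orientation (scanner : List (Int × Int × Int)) : List (List (Int × Int × Int)) :=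
  (PySem.List.pyRange 0 6 1).foldl (fun res r =>
    ([0, 90, 180, 270] : List Int).foldl (fun res o =>
      res ++ [scanner.foldl (fun rotated b => rotated ++ [rotA r o b]) []]) res) []

-- ===== PORT B =====
-- 3x3 integer matrix as a triple of rows
def M3 : Type := (Int × Int × Int) × (Int × Int × Int) × (Int × Int × Int)

def osB : List M3 :=
  [ ((1, 0, 0), (0, 1, 0), (0, 0, 1)),
    ((0, 1, 0), (-1, 0, 0), (0, 0, 1)),
    ((-1, 0, 0), (0, -1, 0), (0, 0, 1)),
    ((0, -1, 0), (1, 0, 0), (0, 0, 1)) ]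

def rsB : List M3 :=
  [ ((1, 0, 0), (0, 1, 0), (0, 0, 1)),
    ((1, 0, 0), (0, 0, -1), (0, 1, 0)),
    ((1, 0, 0), (0, -1, 0), (0, 0, -1)),
    ((1, 0, 0), (0, 0, 1), (0, -1, 0)),
    ((0, 0, 1), (0, 1, 0), (-1, 0, 0)),
    ((0, 0, -1), (0, 1, 0), (1, 0, 0)) ]

def dot3 (u v : Int × Int × Int) : Int := u.1 * v.1 + u.2.1 * v.2.1 + u.2.2 * v.2.2

def mulM3 (a b : M3) : M3 :=
  let c1 := (b.1.1, b.2.1.1, b.2.2.1)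
  let c2 := (b.1.2.1, b.2.1.2.1, b.2.2.2.1)
  let c3 := (b.1.2.2, b.2.1.2.2, b.2.2.2.2)
  ( (dot3 a.1 c1, dot3 a.1 c2, dot3 a.1 c3),
    (dot3 a.2.1 c1, dot3 a.2.1 c2, dot3 a.2.1 c3),
    (dot3 a.2.2 c1, dot3 a.2.2 c2, dot3 a.2.2 c3) )

def matsB : List M3 := rsB.flatMap (fun r => osB.map (fun o => mulM3 r o))

def applyM3 (m : M3) (b : Int × Int × Int) : Int × Int × Int :=
  let x := b.1; let y := b.2.1; let z := b.2.2
  ( m.1.1 * x + m.1.2.1 * y + m.1.2.2 * z,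
    m.2.1.1 * x + m.2.1.2.1 * y + m.2.1.2.2 * z,
    m.2.2.1 * x + m.2.2.2.1 * y + m.2.2.2.2 * z )

def orientation_alt (scanner : List (Int × Int × Int)) : List (List (Int × Int × Int)) :=
  matsB.map (fun m => scanner.map (fun b => applyM3 m b))

-- ===== PRECONDITION & SPEC =====
def Spec_orientation (scanner : List (Int × Int × Int)) (out : List (List (Int × Int × Int))) : Prop := out = orientation_alt scanner
instance (scanner : List (Int × Int × Int)) (out : List (List (Int × Int × Int))) : Decidable (Spec_orientation scanner out) := by unfold Spec_orientation; infer_instance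

-- ===== CLAIM (what is proved, stated in full; the proofs are below) =====
def Claim_equal_orientation : Prop := ∀ (scanner : List (Int × Int × Int)), Dom_orientation scanner → Spec_orientation scanner (orientation scanner)

-- ===== LEMMAS AND PROOFS =====

theorem rotA_eq_apply (r o : Int) (m : M3) (h : ∀ b, rotA r o b = applyM3 m b)
    (scanner : List (Int × Int × Int)) :
    (scanner.map (fun b => [rotA r o b])).flatten =
      scanner.map (fun b => applyM3 m b) := by
  have hf : (fun b => [rotA r o b]) = (fun b : Int × Int × Int => [applyM3 m b]) :=
    funext fun b => by rw [h]
  rw [hf]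
  induction scanner with
  | nil => rfl
  | cons hd tl ih =>
      simp only [List.map_cons, List.flatten_cons, List.singleton_append, ih]

-- ===== VERDICT (by name: the statement is the Claim_ definition above) =====
theorem orientation_spec : Claim_equal_orientation := by
  intro scanner _
  unfold Spec_orientation orientation orientation_alt
  have hr : PySem.List.pyRange 0 6 1 = [0, 1, 2, 3, 4, 5] := by decide
  rw [hr]
  simp only [matsB, rsB, osB, mulM3, dot3, List.flatMap, List.map, List.flatten, List.foldl,
    List.append_nil, List.nil_append, List.cons_append, List.append_eq]
  norm_num [List.cons.injEq]
  repeat' apply And.intro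
  all_goals
    apply rotA_eq_apply
    rintro ⟨x, y, z⟩
    simp [rotA, applyM3]
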